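-- pv_equiv track=rewrite | github.com/anyl92/ALGORITHM | codewars/191207_test4.py | solution
-- ===== SOURCE A (Python) =====
-- import copy
--
-- def solution(A):
--     copyA = copy.deepcopy(A)
--     mini = 99999
--     for i in range(len(A)):
--         cnt = 0
--         tmp = A.pop(i)
--         for num in A:
--             if num == tmp:
--                 continue
--             elif num + tmp == 7:
--                 cnt += 2
--             else:
--                 cnt += 1
--         if cnt < mini:
--             mini = cnt
--         A = copy.deepcopy(copyA)
--
--     return mini
-- ===== SOURCE B (Python) =====
-- def solution(A):
--     freq = {}
--     for x in A:
--         freq[x] = freq.get(x, 0) + 1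
--     n = len(A)
--     mini = 99999
--     for v, f in freq.items():
--         c = n - f + (freq.get(7 - v, 0) if 7 - v != v else 0)
--         if c < mini:
--             mini = c
--     return mini
-- ===== Notes on version B (the rewrite author's own statement) =====
-- stated objective: faster
-- what changed: Replaces the O(n^2) pop-and-rescan over every index by a single frequency-counting pass: cost of removing value v is n - freq[v] + freq[7-v] (the 7-v term dropped when 7-v == v), minimised over distinct values.
import Mathlib
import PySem

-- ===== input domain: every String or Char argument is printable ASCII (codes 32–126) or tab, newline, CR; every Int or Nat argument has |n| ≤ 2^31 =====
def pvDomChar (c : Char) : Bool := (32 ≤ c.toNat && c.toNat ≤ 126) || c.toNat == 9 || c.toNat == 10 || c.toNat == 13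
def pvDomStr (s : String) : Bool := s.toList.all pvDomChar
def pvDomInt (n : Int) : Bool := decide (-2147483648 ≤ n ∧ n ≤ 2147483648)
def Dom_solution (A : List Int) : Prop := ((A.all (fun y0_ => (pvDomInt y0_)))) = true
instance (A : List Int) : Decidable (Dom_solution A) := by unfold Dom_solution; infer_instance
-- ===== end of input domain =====

-- B replaces A's quadratic pop-and-rescan with one frequency-counting pass (equivalence is
-- about the RETURN value only: Python A pops an element from the caller's list as a side effect).

-- ===== PORT A =====
def solution (A : List Int) : Int :=
  (PySem.List.pyRange 0 (PySem.List.len A) 1).foldl (fun mini i =>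
    match PySem.List.pop? A i with
    | some (tmp, rest) =>
        let cnt := rest.foldl (fun cnt num =>
          if num = tmp then cnt
          else if num + tmp = 7 then cnt + 2
          else cnt + 1) 0
        if cnt < mini then cnt else mini
    | none => mini) 99999

-- ===== PORT B =====
def solution_alt (A : List Int) : Int :=
  let freq := A.foldl (fun d x => d.insert x (d.getD x 0 + 1)) PySem.Dict.empty
  let n : Int := A.length
  freq.items.foldl (fun mini p =>
    let c := n - p.2 + (if 7 - p.1 ≠ p.1 then freq.getD (7 - p.1) 0 else 0)
    if c < mini then c else mini) 99999

-- ===== PRECONDITION & SPEC =====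
def Spec_solution (A : List Int) (out : Int) : Prop := out = solution_alt A
instance (A : List Int) (out : Int) : Decidable (Spec_solution A out) := by unfold Spec_solution; infer_instance

-- ===== CLAIM (what is proved, stated in full; the proofs are below) =====
def Claim_equal_solution : Prop := ∀ (A : List Int), Dom_solution A → Spec_solution A (solution A)

-- ===== LEMMAS AND PROOFS =====

-- weight Python's inner loop assigns to element x when tmp = v
def pvW (x v : Int) : Int := if x = v then 0 else if x + v = 7 then 2 else 1

-- total cost of removing (one occurrence of) value v from A
def pvCost (A : List Int) (v : Int) : Int := (A.map (fun x => pvW x v)).sum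

-- running-minimum fold shared by both sides
def pvMinF (m : Int) (l : List Int) : Int := l.foldl (fun m c => if c < m then c else m) m

theorem pvMinF_le (l : List Int) (m : Int) : pvMinF m l ≤ m ∧ ∀ x ∈ l, pvMinF m l ≤ x := by
  induction l generalizing m with
  | nil => simp [pvMinF]
  | cons a t ih =>
      simp only [pvMinF, List.foldl_cons] at *
      rcases ih (if a < m then a else m) with ⟨h1, h2⟩
      have hm : (if a < m then a else m) ≤ m ∧ (if a < m then a else m) ≤ a := by
        split_ifs <;> omega
      refine ⟨le_trans h1 hm.1, ?_⟩
      intro x hx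
      rcases List.mem_cons.mp hx with rfl | hx
      · exact le_trans h1 hm.2
      · exact h2 x hx

theorem pvMinF_mem (l : List Int) (m : Int) : pvMinF m l = m ∨ pvMinF m l ∈ l := by
  induction l generalizing m with
  | nil => simp [pvMinF]
  | cons a t ih =>
      simp only [pvMinF, List.foldl_cons] at *
      rcases ih (if a < m then a else m) with h | h
      · by_cases hc : a < m
        · right; rw [if_pos hc] at h ⊢; rw [h]; exact List.mem_cons_self
        · left; rw [if_neg hc] at h ⊢; exact h
      · right; exact List.mem_cons_of_mem a h

theorem pvMinF_congr (l l' : List Int) (m : Int) (h : ∀ x, x ∈ l ↔ x ∈ l') :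
    pvMinF m l = pvMinF m l' := by
  have le1 := pvMinF_le l m
  have le2 := pvMinF_le l' m
  apply le_antisymm
  · rcases pvMinF_mem l' m with hm | hm
    · omega
    · exact le1.2 _ ((h _).2 hm)
  · rcases pvMinF_mem l m with hm | hm
    · omega
    · exact le2.2 _ ((h _).1 hm)

-- inner loop of A computes init + pvCost
theorem pvInner (rest : List Int) (tmp init : Int) :
    rest.foldl (fun cnt num =>
      if num = tmp then cnt
      else if num + tmp = 7 then cnt + 2
      else cnt + 1) init = init + pvCost rest tmp := by
  induction rest generalizing init with
  | nil => simp [pvCost]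
  | cons a t ih =>
      simp only [List.foldl_cons, ih, pvCost, List.map_cons, List.sum_cons, pvW]
      split_ifs <;> ring

theorem pvCost_eraseIdx (A : List Int) (i : Nat) (h : i < A.length) :
    pvCost (A.eraseIdx i) A[i] = pvCost A A[i] := by
  obtain ⟨v, hv⟩ : ∃ v, A[i] = v := ⟨_, rfl⟩
  have hsplit : A = A.take i ++ v :: A.drop (i + 1) := by
    rw [← hv, List.getElem_cons_drop, List.take_append_drop]
  rw [hv, List.eraseIdx_eq_take_drop_succ]
  conv_rhs => rw [hsplit]
  simp [pvCost, pvW]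

-- A is the min of pvCost over the elements of A
theorem pvA_eq (A : List Int) : solution A = pvMinF 99999 (A.map (pvCost A)) := by
  have hA : A = (List.range A.length).map (fun i => A.getD i 0) := by
    apply List.ext_getElem
    · simp
    · intro i h1 h2
      simp [h1]
  conv_rhs => rw [show A.map (pvCost A)
      = ((List.range A.length).map (fun i => A.getD i 0)).map (pvCost A) from by rw [← hA]]
  rw [List.map_map, pvMinF, List.foldl_map]
  unfold solution
  rw [PySem.List.len_eq, PySem.List.pyRange_zero_nat, List.foldl_map]
  apply PySem.List.foldl_congr_mem
  intro m i hi
  have hlt : i < A.length := List.mem_range.mp hi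
  rw [PySem.List.pop?_natCast A i hlt]
  simp only [pvInner, zero_add, Function.comp, List.getD_eq_getElem A 0 hlt,
    pvCost_eraseIdx A i hlt]

-- closed form of pvCost via counts
theorem pvCost_count (A : List Int) (v : Int) :
    pvCost A v = (A.length : Int) - A.count v +
      (if 7 - v ≠ v then (A.count (7 - v) : Int) else 0) := by
  induction A with
  | nil => simp [pvCost]
  | cons a t ih =>
      simp only [pvCost, List.map_cons, List.sum_cons, List.count_cons, List.length_cons,
        beq_iff_eq, pvW] at ih ⊢
      rw [ih]
      split_ifs <;> push_cast <;> omega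

-- B is the min of pvCost over the distinct elements of A
theorem pvB_eq (A : List Int) :
    solution_alt A = pvMinF 99999 ((PySem.Set.ofList A).map (pvCost A)) := by
  simp only [solution_alt, PySem.Dict.foldl_insert_getD_add_one_eq_counter,
    PySem.Dict.items_counter, List.foldl_map, PySem.Dict.getD_counter, pvMinF]
  apply PySem.List.foldl_congr_mem
  intro m v hv
  rw [pvCost_count]

-- ===== VERDICT (by name: the statement is the Claim_ definition above) =====
theorem solution_spec : Claim_equal_solution := by
  intro A _
  show solution A = solution_alt A
  rw [pvA_eq, pvB_eq]
  apply pvMinF_congr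
  intro x
  constructor <;> intro hx <;> rcases List.mem_map.mp hx with ⟨v, hv, rfl⟩ <;>
    exact List.mem_map.mpr ⟨v, by simpa [PySem.Set.mem_ofList] using hv, rfl⟩
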